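-- pv_equiv track=rewrite | github.com/mirkhosro/shahrvand-scraper | scrape_products.py | fix_brand
-- ===== SOURCE A (Python) =====
-- def fix_brand(brand, all_brands):
--     fixed = None
--     if fixed is None:
--         for good_brand in all_brands:
--             if good_brand.replace(" ", "") == brand.replace(" ", ""):
--                 fixed = good_brand
--     if fixed is None:
--         for good_brand in all_brands:
--             if brand in good_brand.split(" "):
--                 fixed = good_brand
--                 #logger.debug(f"{brand} found in {good_brand}")
--     if fixed is None:
--         for good_brand in all_brands:
--             if brand.replace(" ", "") in good_brand.replace(" ", ""):
--                 fixed = good_brand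
--                 #logger.debug(f"{brand} found in {good_brand}")
--     return fixed
-- ===== SOURCE B (Python) =====
-- def fix_brand(brand, all_brands):
--     # single pass: priority 1 (space-insensitive equality) > 2 (word match) > 3 (substring);
--     # update on level <= best so the LAST match at the best level wins, as in A
--     squished = brand.replace(" ", "")
--     best = 4
--     fixed = None
--     for gb in all_brands:
--         if gb.replace(" ", "") == squished:
--             level = 1
--         elif brand in gb.split(" "):
--             level = 2
--         elif squished in gb.replace(" ", ""):
--             level = 3
--         else:
--             continue
--         if level <= best:
--             best = level
--             fixed = gb
--     return fixed
-- ===== Notes on version B (the rewrite author's own statement) =====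
-- stated objective: faster
-- what changed: Replaces A's three sequential full scans (one per match priority) with a single pass that classifies each brand into a priority level (1 = space-insensitive equality, 2 = word match, 3 = substring) and keeps the last brand seen at the lowest level, hoisting brand.replace(' ','') out of the loop.
import Mathlib
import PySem

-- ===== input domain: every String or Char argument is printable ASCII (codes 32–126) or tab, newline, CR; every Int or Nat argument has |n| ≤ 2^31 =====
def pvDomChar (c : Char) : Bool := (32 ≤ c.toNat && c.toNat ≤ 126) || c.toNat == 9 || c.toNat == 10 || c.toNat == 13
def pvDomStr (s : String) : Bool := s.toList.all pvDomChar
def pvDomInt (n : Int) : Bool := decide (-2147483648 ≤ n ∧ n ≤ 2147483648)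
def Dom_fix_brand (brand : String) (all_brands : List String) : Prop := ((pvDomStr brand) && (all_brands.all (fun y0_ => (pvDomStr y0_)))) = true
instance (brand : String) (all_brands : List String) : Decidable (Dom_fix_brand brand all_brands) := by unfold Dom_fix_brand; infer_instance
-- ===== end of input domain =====

-- B replaces A's three sequential scans (one per match priority) with a single pass that
-- classifies each brand into a priority level and keeps the last brand at the lowest level.


-- ===== PORT A =====
def fix_brand (brand : String) (all_brands : List String) : Option String :=
  let fixed : Option String := none
  let fixed :=
    if fixed = none then
      all_brands.foldl (fun acc gb =>
        if PySem.Str.replace gb " " "" == PySem.Str.replace brand " " "" then some gb else acc) fixed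
    else fixed
  let fixed :=
    if fixed = none then
      all_brands.foldl (fun acc gb =>
        if ((PySem.Str.split? gb " ").getD []).contains brand then some gb else acc) fixed
    else fixed
  let fixed :=
    if fixed = none then
      all_brands.foldl (fun acc gb =>
        if PySem.Str.isIn (PySem.Str.replace brand " " "") (PySem.Str.replace gb " " "") then some gb else acc) fixed
    else fixed
  fixed

-- ===== PORT B =====
-- priority level of a candidate brand, none = no match
def altLevel (brand squished gb : String) : Option Nat :=
  if PySem.Str.replace gb " " "" == squished then some 1
  else if ((PySem.Str.split? gb " ").getD []).contains brand then some 2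
  else if PySem.Str.isIn squished (PySem.Str.replace gb " " "") then some 3
  else none

def fix_brand_alt (brand : String) (all_brands : List String) : Option String :=
  let squished := PySem.Str.replace brand " " ""
  (all_brands.foldl (fun (st : Nat × Option String) gb =>
      match altLevel brand squished gb with
      | none => st
      | some L => if L ≤ st.1 then (L, some gb) else st)
    (4, none)).2

-- ===== PRECONDITION & SPEC =====
def Spec_fix_brand (brand : String) (all_brands : List String) (out : Option String) : Prop := out = fix_brand_alt brand all_brands
instance (brand : String) (all_brands : List String) (out : Option String) : Decidable (Spec_fix_brand brand all_brands out) := by unfold Spec_fix_brand; infer_instance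

-- ===== CLAIM (what is proved, stated in full; the proofs are below) =====
def Claim_equal_fix_brand : Prop := ∀ (brand : String) (all_brands : List String), Dom_fix_brand brand all_brands → Spec_fix_brand brand all_brands (fix_brand brand all_brands)

-- ===== LEMMAS AND PROOFS =====

-- one of A's passes: last match wins
def passFold (p : String → Bool) (l : List String) : Option String :=
  l.foldl (fun acc gb => if p gb then some gb else acc) none

def mkState (a b c : Option String) : Nat × Option String :=
  if a.isSome then (1, a) else if b.isSome then (2, b) else if c.isSome then (3, c) else (4, none)

theorem passFold_append (p : String → Bool) (l : List String) (x : String) :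
    passFold p (l ++ [x]) = if p x then some x else passFold p l := by
  simp [passFold, List.foldl_append]

theorem alt_state (brand squished : String) (l : List String) :
    l.foldl (fun (st : Nat × Option String) gb =>
        match altLevel brand squished gb with
        | none => st
        | some L => if L ≤ st.1 then (L, some gb) else st) (4, none)
      = mkState (passFold (fun gb => PySem.Str.replace gb " " "" == squished) l)
                (passFold (fun gb => ((PySem.Str.split? gb " ").getD []).contains brand) l)
                (passFold (fun gb => PySem.Str.isIn squished (PySem.Str.replace gb " " "")) l) := by
  induction l using List.reverseRecOn with
  | nil => simp [passFold, mkState]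
  | append_singleton l x ih =>
    rw [List.foldl_append, ih]
    simp only [List.foldl_cons, List.foldl_nil, passFold_append, altLevel, mkState]
    by_cases h1 : PySem.Str.replace x " " "" == squished <;>
      by_cases h2 : ((PySem.Str.split? x " ").getD []).contains brand <;>
        by_cases h3 : PySem.Str.isIn squished (PySem.Str.replace x " " "") <;>
          simp [h1] <;> split_ifs <;> simp_all

theorem fix_brand_def (brand : String) (l : List String) :
    fix_brand brand l =
      (let f1 := passFold (fun gb => PySem.Str.replace gb " " "" == PySem.Str.replace brand " " "") l
       let f2 := if f1 = none then
           l.foldl (fun acc gb => if ((PySem.Str.split? gb " ").getD []).contains brand then some gb else acc) f1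
         else f1
       if f2 = none then
         l.foldl (fun acc gb => if PySem.Str.isIn (PySem.Str.replace brand " " "") (PySem.Str.replace gb " " "") then some gb else acc) f2
       else f2) := rfl

theorem fix_brand_eq_passes (brand : String) (l : List String) :
    fix_brand brand l =
      (mkState (passFold (fun gb => PySem.Str.replace gb " " "" == PySem.Str.replace brand " " "") l)
               (passFold (fun gb => ((PySem.Str.split? gb " ").getD []).contains brand) l)
               (passFold (fun gb => PySem.Str.isIn (PySem.Str.replace brand " " "") (PySem.Str.replace gb " " "")) l)).2 := by
  rw [fix_brand_def]
  cases h1 : passFold (fun gb => PySem.Str.replace gb " " "" == PySem.Str.replace brand " " "") l with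
  | some v => simp [mkState]
  | none =>
    cases h2 : passFold (fun gb => ((PySem.Str.split? gb " ").getD []).contains brand) l with
    | some v =>
      simp [passFold] at h2
      simp [mkState, h2]
    | none =>
      simp [passFold] at h2
      cases h3 : passFold (fun gb => PySem.Str.isIn (PySem.Str.replace brand " " "") (PySem.Str.replace gb " " "")) l with
      | some v =>
        simp [passFold] at h3
        simp [mkState, h2, h3]
      | none =>
        simp [passFold] at h3
        simp [mkState, h2, h3]

-- ===== VERDICT (by name: the statement is the Claim_ definition above) =====
theorem alt_eq (brand : String) (l : List String) :
    fix_brand_alt brand l =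
      (l.foldl (fun (st : Nat × Option String) gb =>
        match altLevel brand (PySem.Str.replace brand " " "") gb with
        | none => st
        | some L => if L ≤ st.1 then (L, some gb) else st) (4, none)).2 := rfl

theorem fix_brand_spec : Claim_equal_fix_brand := by
  intro brand all_brands _
  unfold Spec_fix_brand
  rw [alt_eq, alt_state, fix_brand_eq_passes]
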